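-- pv_equiv track=rewrite | github.com/andresrcorcho/Dynamics-of-Arc-Continent-Collision | Arc-continent collision scripts/ModelGeometry.py | fuseListM
-- ===== SOURCE A (Python) =====
-- def fuseListM(lists):
--     fListx=[]
--     fListy=[]
--     for i in lists:
--         for j,k in zip(i[0],i[1]):
-- #         fauxX=[i[0]]
-- #         fauxY=[i[1]]
--             fListx=fListx+[j]
--             fListy=fListy+[k]
--     return fListx,fListy
-- ===== SOURCE B (Python) =====
-- def fuseListM(lists):
--     pairs = [p for i in lists for p in zip(i[0], i[1])]
--     if pairs:
--         fx, fy = zip(*pairs)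
--         return list(fx), list(fy)
--     return [], []
-- ===== Notes on version B (the rewrite author's own statement) =====
-- stated objective: faster
-- what changed: A rebuilds both accumulator lists with quadratic list+[x] concatenation in lockstep; B flattens all zipped pairs once into a single list of tuples and then transposes it with zip(*), a build-then-unzip decomposition.
import Mathlib
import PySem

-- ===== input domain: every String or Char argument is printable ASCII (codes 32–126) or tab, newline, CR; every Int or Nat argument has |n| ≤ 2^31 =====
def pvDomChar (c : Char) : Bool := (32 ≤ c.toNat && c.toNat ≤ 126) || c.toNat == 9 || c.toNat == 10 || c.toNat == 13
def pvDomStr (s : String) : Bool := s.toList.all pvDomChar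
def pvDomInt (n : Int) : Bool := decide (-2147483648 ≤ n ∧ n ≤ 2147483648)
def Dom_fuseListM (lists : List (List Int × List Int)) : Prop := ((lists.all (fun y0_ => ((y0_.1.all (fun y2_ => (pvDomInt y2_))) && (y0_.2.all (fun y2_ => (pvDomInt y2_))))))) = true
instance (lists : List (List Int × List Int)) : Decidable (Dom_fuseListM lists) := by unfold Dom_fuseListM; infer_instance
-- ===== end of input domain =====

-- ===== PORT A =====
-- A: lockstep two-accumulator loop with list+[x] concatenation, step for step.
def fuseListM (lists : List (List Int × List Int)) : List Int × List Int :=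
  lists.foldl
    (fun st i =>
      (i.1.zip i.2).foldl (fun st jk => (st.1 ++ [jk.1], st.2 ++ [jk.2])) st)
    ([], [])

-- ===== PORT B =====
-- B: flatten all zipped pairs once, then transpose; faster in Python by avoiding quadratic concatenation.
def fuseListM_alt (lists : List (List Int × List Int)) : List Int × List Int :=
  let pairs := lists.flatMap (fun i => i.1.zip i.2)
  if pairs.isEmpty then ([], [])
  else (pairs.map Prod.fst, pairs.map Prod.snd)

-- ===== PRECONDITION & SPEC =====
def Spec_fuseListM (lists : List (List Int × List Int)) (out : List Int × List Int) : Prop := out = fuseListM_alt lists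
instance (lists : List (List Int × List Int)) (out : List Int × List Int) : Decidable (Spec_fuseListM lists out) := by unfold Spec_fuseListM; infer_instance

-- ===== CLAIM (what is proved, stated in full; the proofs are below) =====
def Claim_equal_fuseListM : Prop := ∀ (lists : List (List Int × List Int)), Dom_fuseListM lists → Spec_fuseListM lists (fuseListM lists)

-- ===== LEMMAS AND PROOFS =====

lemma inner_acc (ps : List (Int × Int)) (fx fy : List Int) :
    ps.foldl (fun st jk => (st.1 ++ [jk.1], st.2 ++ [jk.2])) (fx, fy)
      = (fx ++ ps.map Prod.fst, fy ++ ps.map Prod.snd) := by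
  induction ps generalizing fx fy with
  | nil => simp
  | cons p ps ih => simp [List.foldl, ih]

lemma outer_acc (lists : List (List Int × List Int)) (fx fy : List Int) :
    lists.foldl
      (fun st i => (i.1.zip i.2).foldl (fun st jk => (st.1 ++ [jk.1], st.2 ++ [jk.2])) st)
      (fx, fy)
      = (fx ++ (lists.flatMap (fun i => i.1.zip i.2)).map Prod.fst,
         fy ++ (lists.flatMap (fun i => i.1.zip i.2)).map Prod.snd) := by
  induction lists generalizing fx fy with
  | nil => simp
  | cons i rest ih => simp [List.foldl, inner_acc, ih]

-- ===== VERDICT (by name: the statement is the Claim_ definition above) =====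
theorem fuseListM_spec : Claim_equal_fuseListM := by
  intro lists _
  unfold Spec_fuseListM fuseListM fuseListM_alt
  rcases h : lists.flatMap (fun i => i.1.zip i.2) with _ | ⟨p, ps⟩ <;>
    simp [outer_acc, h]
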